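-- pv_equiv track=rewrite | github.com/mProjectsCode/image_resizer | image_reziser.py | modifyName
-- ===== SOURCE A (Python) =====
-- def modifyName(s: str, x: int, y: int):
--     foundSuffix = False
--     suffix = ''
--     name = ''
--
--     for i in range(len(s), 0, -1):
--         if s[i-1] == '.':
--             foundSuffix = True
--         else:
--             if foundSuffix:
--                 name += s[i-1]
--             else:
--                 suffix += s[i-1]
--
--     return ''.join([name[::-1], '_', str(x), 'x', str(y), '.', suffix[::-1]])
-- ===== SOURCE B (Python) =====
-- def modifyName(s: str, x: int, y: int):
--     parts = s.split('.')
--     return ''.join([''.join(parts[:-1]), '_', str(x), 'x', str(y), '.', parts[-1]])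
-- ===== Notes on version B (the rewrite author's own statement) =====
-- stated objective: simpler
-- what changed: A scans the string backwards character by character maintaining a foundSuffix flag and two per-character string accumulators that are finally reversed; B tokenizes with s.split('.'), rejoins all pieces but the last (naturally dropping interior dots) and takes the last piece as the suffix.
import Mathlib
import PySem

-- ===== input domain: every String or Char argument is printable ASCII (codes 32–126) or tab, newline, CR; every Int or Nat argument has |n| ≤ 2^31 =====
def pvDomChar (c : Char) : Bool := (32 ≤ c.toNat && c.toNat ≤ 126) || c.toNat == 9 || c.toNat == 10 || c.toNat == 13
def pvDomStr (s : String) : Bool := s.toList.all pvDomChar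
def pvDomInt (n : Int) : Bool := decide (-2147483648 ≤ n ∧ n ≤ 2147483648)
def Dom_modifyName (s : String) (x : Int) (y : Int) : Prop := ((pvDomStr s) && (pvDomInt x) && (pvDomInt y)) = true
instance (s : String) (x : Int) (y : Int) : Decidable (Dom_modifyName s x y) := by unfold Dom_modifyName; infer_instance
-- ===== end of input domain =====

-- B replaces A's backward character-by-character scan by tokenization: split the name on '.',
-- rejoin all pieces but the last, and append the dimensions; simpler decomposition, same values.

-- ===== PORT A =====
-- A's loop body over the index i of range(len(s),0,-1); s[i-1] via pyGet?
-- (state = (foundSuffix, suffix, name), Python strings as List Char)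
def modifyNameStep (cs : List Char) (st : Bool × List Char × List Char) (i : Int) :
    Bool × List Char × List Char :=
  match PySem.List.pyGet? cs (i - 1) with
  | none => st
  | some c =>
    if c = '.' then (true, st.2.1, st.2.2)
    else if st.1 = true then (st.1, st.2.1, st.2.2 ++ [c])
    else (st.1, st.2.1 ++ [c], st.2.2)

def modifyName (s : String) (x : Int) (y : Int) : String :=
  let cs := s.toList
  let st := (PySem.List.pyRange (cs.length : Int) 0 (-1)).foldl (modifyNameStep cs) (false, [], [])
  -- name[::-1] and suffix[::-1] are reversals (PySem.List.slice?_none_none_neg_one)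
  String.ofList (PySem.Chars.join [] [st.2.2.reverse, ['_'], PySem.Int.toChars x, ['x'],
    PySem.Int.toChars y, ['.'], st.2.1.reverse])

-- ===== PORT B =====
def modifyName_alt (s : String) (x : Int) (y : Int) : String :=
  let parts := PySem.Chars.splitOn s.toList ['.']
  -- parts[-1]; str.split never returns an empty list, so the index is always in range
  let last := (PySem.List.pyGet? parts (-1)).getD []
  String.ofList (PySem.Chars.join [] [PySem.Chars.join [] (PySem.List.slice parts none (some (-1))),
    ['_'], PySem.Int.toChars x, ['x'], PySem.Int.toChars y, ['.'], last])

-- ===== PRECONDITION & SPEC =====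
def Spec_modifyName (s : String) (x : Int) (y : Int) (out : String) : Prop := out = modifyName_alt s x y
instance (s : String) (x : Int) (y : Int) (out : String) : Decidable (Spec_modifyName s x y out) := by unfold Spec_modifyName; infer_instance

-- ===== CLAIM (what is proved, stated in full; the proofs are below) =====
def Claim_equal_modifyName : Prop := ∀ (s : String) (x : Int) (y : Int), Dom_modifyName s x y → Spec_modifyName s x y (modifyName s x y)

-- ===== LEMMAS AND PROOFS =====

-- reference splitter: what s.split('.') computes, as a structural recursion
def splitSpec : List Char → List (List Char)
  | [] => [[]]
  | c :: cs => if c = '.' then [] :: splitSpec cs else (splitSpec cs).modifyHead (c :: ·)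

-- A's loop body at the character level
def stepChar (st : Bool × List Char × List Char) (c : Char) : Bool × List Char × List Char :=
  if c = '.' then (true, st.2.1, st.2.2)
  else if st.1 = true then (st.1, st.2.1, st.2.2 ++ [c])
  else (st.1, st.2.1 ++ [c], st.2.2)

theorem splitSpec_ne_nil (cs : List Char) : splitSpec cs ≠ [] := by
  induction cs with
  | nil => simp [splitSpec]
  | cons c cs ih =>
    simp only [splitSpec]
    split
    · simp
    · intro h
      have := congrArg List.length h
      simp at this
      exact ih this

theorem splitSpec_cons (cs : List Char) : ∃ p ps, splitSpec cs = p :: ps := by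
  cases h : splitSpec cs with
  | nil => exact absurd h (splitSpec_ne_nil cs)
  | cons p ps => exact ⟨p, ps, rfl⟩

theorem go_eq (fuel : Nat) : ∀ (l cur : List Char) (acc : List (List Char)), l.length ≤ fuel →
    PySem.Chars.splitOn.go ['.'] fuel l cur acc
      = acc.reverse ++ (splitSpec l).modifyHead (cur.reverse ++ ·) := by
  induction fuel with
  | zero =>
    intro l cur acc h
    have hl : l = [] := by cases l <;> simp_all
    subst hl
    simp [PySem.Chars.splitOn.go, splitSpec]
  | succ fuel ih =>
    intro l cur acc h
    cases l with
    | nil => simp [PySem.Chars.splitOn.go, splitSpec]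
    | cons c rest =>
      have gstep : PySem.Chars.splitOn.go ['.'] (fuel+1) (c::rest) cur acc
          = if ['.'].isPrefixOf (c::rest) = true then
              PySem.Chars.splitOn.go ['.'] fuel (List.drop ['.'].length (c::rest)) []
                (cur.reverse :: acc)
            else PySem.Chars.splitOn.go ['.'] fuel rest (c :: cur) acc := by
        rw [PySem.Chars.splitOn.go.eq_def]
      rw [gstep]
      obtain ⟨p, ps, e⟩ := splitSpec_cons rest
      by_cases hc : c = '.'
      · subst hc
        rw [if_pos (by simp)]
        rw [show List.drop ['.'].length ('.' :: rest) = rest from rfl]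
        rw [ih rest [] (cur.reverse :: acc) (by simp at h; omega)]
        simp [splitSpec, e]
      · rw [if_neg (by simp [List.isPrefixOf, Ne.symm hc])]
        rw [ih rest (c :: cur) acc (by simp at h; omega)]
        simp [splitSpec, e, hc]

theorem splitOn_eq (cs : List Char) : PySem.Chars.splitOn cs ['.'] = splitSpec cs := by
  have h := go_eq (cs.length + 1) cs [] [] (by omega)
  obtain ⟨p, ps, e⟩ := splitSpec_cons cs
  show PySem.Chars.splitOn.go ['.'] (cs.length + 1) cs [] [] = splitSpec cs
  rw [h, e]
  simp

theorem splitSpec_no_dot (cs : List Char) (h : '.' ∉ cs) : splitSpec cs = [cs] := by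
  induction cs with
  | nil => simp [splitSpec]
  | cons c cs ih =>
    simp at h
    simp [splitSpec, Ne.symm h.1, ih h.2]

theorem splitSpec_dot_len (cs : List Char) (h : '.' ∈ cs) : 2 ≤ (splitSpec cs).length := by
  induction cs with
  | nil => simp at h
  | cons c cs ih =>
    by_cases hc : c = '.'
    · have := splitSpec_ne_nil cs
      simp [splitSpec, hc]
      cases h' : splitSpec cs with
      | nil => exact absurd h' this
      | cons p ps => simp
    · simp [splitSpec, hc]
      have : '.' ∈ cs := by
        rcases List.mem_cons.mp h with h1 | h1
        · exact absurd h1.symm hc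
        · exact h1
      exact ih this

theorem inv (cs : List Char) : cs.reverse.foldl stepChar (false, [], [])
    = (decide ('.' ∈ cs), ((splitSpec cs).getLastD []).reverse,
       ((splitSpec cs).dropLast.flatten).reverse) := by
  induction cs with
  | nil => simp [splitSpec]
  | cons c cs ih =>
    rw [List.reverse_cons, List.foldl_append, ih]
    simp only [List.foldl_cons, List.foldl_nil]
    obtain ⟨p, ps, e⟩ := splitSpec_cons cs
    by_cases hc : c = '.'
    · subst hc
      simp [stepChar, splitSpec, e, List.getLastD_eq_getLast?]
    · by_cases hm : '.' ∈ cs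
      · have hlen := splitSpec_dot_len cs hm
        rw [e] at hlen
        obtain ⟨q, qs, e2⟩ : ∃ q qs, ps = q :: qs := by
          cases ps with
          | nil => simp at hlen
          | cons q qs => exact ⟨q, qs, rfl⟩
        subst e2
        simp [stepChar, splitSpec, e, hc, hm, List.getLastD_eq_getLast?]
      · have e2 : splitSpec cs = [cs] := splitSpec_no_dot cs hm
        simp [stepChar, splitSpec, e2, hc, hm, Ne.symm hc, List.getLastD_eq_getLast?]

theorem fold_range (cs : List Char) : ∀ (k : Nat), k ≤ cs.length → ∀ st,
    (PySem.List.pyRange (k : Int) 0 (-1)).foldl (modifyNameStep cs) st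
      = ((cs.take k).reverse).foldl stepChar st := by
  intro k
  induction k with
  | zero => intro _ st; norm_num [PySem.List.pyRange]
  | succ k ih =>
    intro hk st
    have emp : PySem.List.pyRange ((k : Int) + 2) ((k : Int) + 2) 1 = [] := by
      norm_num [PySem.List.pyRange]
    have hlast : PySem.List.pyRange ((k : Int) + 1) ((k : Int) + 2) 1 = [(k : Int) + 1] := by
      rw [PySem.List.pyRange_one_cons (by omega)]
      rw [show (k : Int) + 1 + 1 = (k : Int) + 2 from by ring, emp]
    have hsplit := PySem.List.pyRange_one_append 1 ((k : Int) + 1) ((k : Int) + 2)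
      (by omega) (by omega)
    have hcons : PySem.List.pyRange (((k + 1 : Nat)) : Int) 0 (-1)
        = ((k : Int) + 1) :: PySem.List.pyRange (k : Int) 0 (-1) := by
      rw [PySem.List.pyRange_neg_one_eq_reverse, PySem.List.pyRange_neg_one_eq_reverse]
      rw [show ((0 : Int) + 1) = 1 from by ring]
      rw [show (((k + 1 : Nat) : Int) + 1) = (k : Int) + 2 from by push_cast; ring]
      rw [hsplit, hlast, List.reverse_append]
      simp
    rw [hcons, List.foldl_cons]
    have hk' : k < cs.length := by omega
    have hstep : modifyNameStep cs st ((k : Int) + 1) = stepChar st cs[k] := by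
      have hidx : (k : Int) + 1 - 1 = ((k : Nat) : Int) := by ring
      simp only [modifyNameStep, hidx, PySem.List.pyGet?_natCast,
        List.getElem?_eq_getElem hk']
      rfl
    have htake : List.take (k+1) cs = List.take k cs ++ [cs[k]] := by
      rw [List.take_add_one, List.getElem?_eq_getElem hk']
      simp
    rw [hstep, ih (by omega), htake, List.reverse_append, List.reverse_singleton,
      List.singleton_append, List.foldl_cons]

theorem joinFlat (l : List (List Char)) : PySem.Chars.join [] l = l.flatten := by
  induction l with
  | nil => simp [PySem.Chars.join, List.intercalate]
  | cons x xs ih =>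
    cases xs with
    | nil => simp [PySem.Chars.join, List.intercalate]
    | cons y ys =>
      simp only [PySem.Chars.join, List.intercalate, List.intersperse] at ih ⊢
      simp_all

theorem slice_neg1 (l : List (List Char)) : PySem.List.slice l none (some (-1)) = l.dropLast := by
  cases l with
  | nil => simp [PySem.List.slice, PySem.List.clampIdx]
  | cons a as =>
    simp [PySem.List.slice, PySem.List.clampIdx, List.dropLast_eq_take]
    split_ifs with h2
    · exact absurd h2 (by omega)
    · omega

theorem pyGetNeg1 (l : List (List Char)) (h : l ≠ []) :
    (PySem.List.pyGet? l (-1)).getD [] = l.getLastD [] := by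
  cases l with
  | nil => simp at h
  | cons a as =>
    simp [PySem.List.pyGet?, PySem.List.pyIdx?, List.getLastD_eq_getLast?,
      List.getLast?_eq_getElem?]

-- ===== VERDICT (by name: the statement is the Claim_ definition above) =====
theorem modifyName_spec : Claim_equal_modifyName := by
  intro s x y _
  unfold Spec_modifyName
  simp only [modifyName, modifyName_alt]
  have hfold := fold_range s.toList s.toList.length (le_refl _) (false, [], [])
  rw [List.take_length] at hfold
  rw [hfold, inv, splitOn_eq, slice_neg1, pyGetNeg1 _ (splitSpec_ne_nil _)]
  simp [joinFlat]
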